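-- pv_equiv track=rewrite | github.com/kcmao/leetcode_- | jianzhioffer2/13_机器人的运动范围.py | check_digits
-- ===== SOURCE A (Python) =====
-- def check_digits(x, y, rows, cols, threshold):
--
--     if x < 0 or y < 0 or x > rows or y > cols:
--         return False
--     x = str(x)
--     y = str(y)
--     digits_sum = 0
--     for n in x:
--         digits_sum += int(n)
--     for n in y:
--         digits_sum += int(n)
--
--     if digits_sum > threshold:
--         return False
--     else:
--         return True
-- ===== SOURCE B (Python) =====
-- def check_digits(x, y, rows, cols, threshold):
--     if x < 0 or y < 0 or x > rows or y > cols: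
--         return False
--     total = 0
--     n = x
--     while n > 0:
--         total += n % 10
--         n //= 10
--     n = y
--     while n > 0:
--         total += n % 10
--         n //= 10
--     return total <= threshold
-- ===== Notes on version B (the rewrite author's own statement) =====
-- stated objective: alternative
-- what changed: Digit sums are computed arithmetically with while-loops over n%10 / n//10 instead of converting the coordinates to strings and summing their characters, and the final comparison is returned directly instead of via an if/else.
import Mathlib
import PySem

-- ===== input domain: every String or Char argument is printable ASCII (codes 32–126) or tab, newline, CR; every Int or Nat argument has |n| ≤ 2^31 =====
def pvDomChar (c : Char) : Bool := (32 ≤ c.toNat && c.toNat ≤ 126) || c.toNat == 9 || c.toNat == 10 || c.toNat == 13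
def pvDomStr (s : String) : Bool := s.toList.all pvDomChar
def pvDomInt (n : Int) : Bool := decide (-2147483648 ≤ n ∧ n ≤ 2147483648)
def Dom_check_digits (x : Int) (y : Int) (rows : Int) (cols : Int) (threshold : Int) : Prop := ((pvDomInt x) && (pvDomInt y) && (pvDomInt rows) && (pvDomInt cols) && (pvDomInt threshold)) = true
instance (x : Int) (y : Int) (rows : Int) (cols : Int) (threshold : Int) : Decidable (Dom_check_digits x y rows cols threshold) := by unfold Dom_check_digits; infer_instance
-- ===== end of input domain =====

-- B computes the digit sums arithmetically (n % 10 / n // 10 loops) instead of summing the characters of str(x)/str(y); alternative decomposition, same cost.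


-- ===== PORT A =====
-- int(n) on a one-character digit string is PySem.Int.ofChars? [c]; inside the guard x,y ≥ 0, so str(x)/str(y)
-- consist of digits only and ofChars? is always some (getD 0 is never the default on reached inputs).
def check_digits (x : Int) (y : Int) (rows : Int) (cols : Int) (threshold : Int) : Bool :=
  if x < 0 || y < 0 || x > rows || y > cols then false
  else
    let xs := PySem.Int.toChars x
    let ys := PySem.Int.toChars y
    let s1 : Int := xs.foldl (fun acc c => acc + (PySem.Int.ofChars? [c]).getD 0) 0
    let s2 : Int := ys.foldl (fun acc c => acc + (PySem.Int.ofChars? [c]).getD 0) s1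
    if s2 > threshold then false else true

-- ===== PORT B =====
-- 'while n > 0: total += n % 10; n //= 10'
def pvDigitLoop (total : Int) (n : Int) : Int :=
  if _h : 0 < n then pvDigitLoop (total + PySem.Int.mod n 10) (PySem.Int.floordiv n 10) else total
termination_by n.toNat
decreasing_by
  simp only [PySem.Int.floordiv_eq_ediv_of_pos (by norm_num : (0:Int) < 10)]
  omega

def check_digits_alt (x : Int) (y : Int) (rows : Int) (cols : Int) (threshold : Int) : Bool :=
  if x < 0 || y < 0 || x > rows || y > cols then false
  else
    let t1 := pvDigitLoop 0 x
    let t2 := pvDigitLoop t1 y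
    decide (t2 ≤ threshold)

-- ===== PRECONDITION & SPEC =====
def Spec_check_digits (x : Int) (y : Int) (rows : Int) (cols : Int) (threshold : Int) (out : Bool) : Prop := out = check_digits_alt x y rows cols threshold
instance (x : Int) (y : Int) (rows : Int) (cols : Int) (threshold : Int) (out : Bool) : Decidable (Spec_check_digits x y rows cols threshold out) := by unfold Spec_check_digits; infer_instance

-- ===== CLAIM (what is proved, stated in full; the proofs are below) =====
def Claim_equal_check_digits : Prop := ∀ (x : Int) (y : Int) (rows : Int) (cols : Int) (threshold : Int), Dom_check_digits x y rows cols threshold → Spec_check_digits x y rows cols threshold (check_digits x y rows cols threshold)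

-- ===== LEMMAS AND PROOFS =====

-- mathematical digit sum, connecting both programs
def pvS (m : Nat) : Int := ((Nat.digits 10 m).map (fun d : Nat => (d : Int))).sum

lemma pv_g_digitChar (d : Nat) (h : d < 10) :
    (PySem.Int.ofChars? [Nat.digitChar d]).getD 0 = (d : Int) := by
  interval_cases d <;> decide

lemma pv_pvS_step (m : Nat) (hm : 0 < m) : pvS m = ((m % 10 : Nat) : Int) + pvS (m / 10) := by
  rw [pvS, Nat.digits_def' (by norm_num : 1 < 10) hm, List.map_cons, List.sum_cons]
  rfl

lemma pv_toDigitsCore_sum (fuel : Nat) : ∀ (m : Nat) (ds : List Char), m < fuel →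
    ((Nat.toDigitsCore 10 fuel m ds).map (fun c => (PySem.Int.ofChars? [c]).getD 0)).sum
      = pvS m + ((ds.map (fun c => (PySem.Int.ofChars? [c]).getD 0)).sum) := by
  induction fuel with
  | zero => intro m ds h; omega
  | succ f ih =>
    intro m ds h
    rw [Nat.toDigitsCore]
    by_cases h0 : m / 10 = 0
    · rw [if_pos h0, List.map_cons, List.sum_cons,
        pv_g_digitChar (m % 10) (Nat.mod_lt _ (by norm_num))]
      by_cases hz : m = 0
      · subst hz; simp [pvS]
      · rw [pv_pvS_step m (Nat.pos_of_ne_zero hz), h0]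
        simp [pvS]
    · rw [if_neg h0]
      have hmpos : 0 < m := by omega
      have hlt : m / 10 < f := by
        have h1 : m / 10 < m := Nat.div_lt_self hmpos (by norm_num)
        omega
      rw [ih (m / 10) _ hlt, List.map_cons, List.sum_cons,
        pv_g_digitChar (m % 10) (Nat.mod_lt _ (by norm_num)),
        pv_pvS_step m hmpos]
      ring

lemma pv_charSum_toChars (n : Int) (hn : 0 ≤ n) :
    ((PySem.Int.toChars n).map (fun c => (PySem.Int.ofChars? [c]).getD 0)).sum = pvS n.toNat := by
  rw [PySem.Int.toChars, if_neg (by omega)]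
  rw [Nat.toDigits, pv_toDigitsCore_sum (n.toNat + 1) n.toNat [] (Nat.lt_succ_self _)]
  simp

lemma pv_digitLoop_eq (n : Int) (total : Int) : pvDigitLoop total n = total + pvS n.toNat := by
  induction total, n using pvDigitLoop.induct with
  | case1 total n h ih =>
    rw [pvDigitLoop, dif_pos h, ih]
    have h10 : (0:Int) < 10 := by norm_num
    rw [PySem.Int.mod_eq_emod_of_pos h10, PySem.Int.floordiv_eq_ediv_of_pos h10]
    have hpos : 0 < n.toNat := by omega
    have hmod : n % 10 = ((n.toNat % 10 : Nat) : Int) := by omega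
    have hdiv : (n / 10).toNat = n.toNat / 10 := by omega
    rw [hmod, hdiv, pv_pvS_step n.toNat hpos]
    ring
  | case2 total n h =>
    rw [pvDigitLoop, dif_neg h]
    have : n.toNat = 0 := by omega
    simp [this, pvS]

-- ===== VERDICT (by name: the statement is the Claim_ definition above) =====
theorem check_digits_spec : Claim_equal_check_digits := by
  intro x y rows cols threshold _
  unfold Spec_check_digits check_digits check_digits_alt
  by_cases hg : x < 0 || y < 0 || x > rows || y > cols
  · rw [if_pos hg, if_pos hg]
  · rw [if_neg hg, if_neg hg]
    dsimp only
    simp only [Bool.or_eq_true, decide_eq_true_eq, not_or] at hg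
    obtain ⟨⟨⟨hx, hy⟩, _⟩, _⟩ := hg
    have hx' : 0 ≤ x := by omega
    have hy' : 0 ≤ y := by omega
    rw [PySem.List.foldl_add, PySem.List.foldl_add]
    rw [pv_charSum_toChars x hx', pv_charSum_toChars y hy']
    rw [pv_digitLoop_eq, pv_digitLoop_eq]
    by_cases hle : 0 + pvS x.toNat + pvS y.toNat ≤ threshold
    · rw [if_neg (by omega), decide_eq_true hle]
    · rw [if_pos (by omega)]
      rw [eq_comm, decide_eq_false_iff_not]
      omega
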